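-- pv_equiv track=rewrite | github.com/jms7446/hackerrank | baekjoon/sliver/p5874.py | count_cases_old
-- ===== SOURCE A (Python) =====
-- import heapq
--
-- def str_findall(ptn, s):
--     idx = s.find(ptn)
--     while idx != -1:
--         yield idx
--         idx = s.find(ptn, idx + 1)
--
-- def str_findall_2str(ptn1, ptn2, s):
--     xs1 = ((idx, ptn1) for idx in str_findall(ptn1, s))
--     xs2 = ((idx, ptn2) for idx in str_findall(ptn2, s))
--     return heapq.merge(xs1, xs2)
--
-- def count_cases_old(s):
--     FL, TL = '((', '))'
--     xc, yc, count = 0, 0, 0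
--     for _, m in str_findall_2str(FL, TL, s):
--         if m == FL:
--             xc += 1
--             count -= yc
--         else:
--             yc += 1
--     count += xc * yc
--     return count
-- ===== SOURCE B (Python) =====
-- def count_cases_old(s):
--     opens = 0
--     count = 0
--     for i in range(len(s) - 1):
--         w = s[i:i + 2]
--         if w == '((':
--             opens += 1
--         elif w == '))':
--             count += opens
--     return count
-- ===== Notes on version B (the rewrite author's own statement) =====
-- stated objective: simpler
-- what changed: Replaced the find-loop occurrence generators, heapq.merge and the total-minus-reversed-pairs accounting with one direct left-to-right scan over the 2-character windows, counting open-pair windows seen so far and adding that count at each close-pair window.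
import Mathlib
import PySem

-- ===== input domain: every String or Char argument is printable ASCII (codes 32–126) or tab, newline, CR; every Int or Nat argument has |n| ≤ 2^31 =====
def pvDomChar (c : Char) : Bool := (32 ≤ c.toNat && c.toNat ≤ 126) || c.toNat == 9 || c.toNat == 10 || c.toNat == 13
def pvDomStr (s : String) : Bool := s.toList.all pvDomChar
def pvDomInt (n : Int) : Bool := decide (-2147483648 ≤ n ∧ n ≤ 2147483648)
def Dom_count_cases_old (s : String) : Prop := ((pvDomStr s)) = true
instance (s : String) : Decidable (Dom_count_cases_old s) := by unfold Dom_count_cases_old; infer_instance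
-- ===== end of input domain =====

-- B replaces the find-loop generators, heapq.merge and the total-minus-reversed-pairs trick
-- with one direct left-to-right scan (objective: simpler).

-- ===== PORT A =====
-- str_findall's while loop; the fuel s.length+1 always suffices: found indices strictly increase
def goFindall (ptn s : String) : Nat → Int → List Int
  | 0, _ => []
  | fuel+1, idx =>
    if idx = -1 then []
    else idx :: goFindall ptn s fuel (PySem.Str.findFrom s ptn (idx + 1) none)

def strFindall (ptn s : String) : List Int :=
  goFindall ptn s (s.length + 1) (PySem.Str.find s ptn)

-- Python tuple comparison (idx, ptn) < (idx', ptn'), as heapq.merge compares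
def pairLt (y x : Int × String) : Bool :=
  decide (y.1 < x.1) || (y.1 == x.1 && decide (y.2 < x.2))

-- heapq.merge of two sorted streams: take from the second only when strictly smaller
def mergePairs : List (Int × String) → List (Int × String) → List (Int × String)
  | [], ys => ys
  | x :: xs, [] => x :: xs
  | x :: xs, y :: ys =>
    if pairLt y x then y :: mergePairs (x :: xs) ys
    else x :: mergePairs xs (y :: ys)

def strFindall2Str (ptn1 ptn2 s : String) : List (Int × String) :=
  mergePairs ((strFindall ptn1 s).map (fun i => (i, ptn1)))
             ((strFindall ptn2 s).map (fun i => (i, ptn2)))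

-- the for-loop body: state (xc, yc, count)
def caseStepA (acc : Int × Int × Int) (m : Int × String) : Int × Int × Int :=
  if m.2 == "((" then (acc.1 + 1, acc.2.1, acc.2.2 - acc.2.1)
  else (acc.1, acc.2.1 + 1, acc.2.2)

def count_cases_old (s : String) : Int :=
  let st := (strFindall2Str "((" "))" s).foldl caseStepA (0, 0, 0)
  st.2.2 + st.1 * st.2.1

-- ===== PORT B =====
-- loop body of the single scan: state (opens, count), window s[i:i+2]
def scanStepB (s : String) (acc : Int × Int) (i : Int) : Int × Int :=
  let w := PySem.Str.slice s (some i) (some (i + 2))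
  if w == "((" then (acc.1 + 1, acc.2)
  else if w == "))" then (acc.1, acc.2 + acc.1)
  else acc

def count_cases_old_alt (s : String) : Int :=
  ((PySem.List.pyRange 0 (PySem.Str.len s - 1) 1).foldl (scanStepB s) (0, 0)).2

-- ===== PRECONDITION & SPEC =====
def Spec_count_cases_old (s : String) (out : Int) : Prop := out = count_cases_old_alt s
instance (s : String) (out : Int) : Decidable (Spec_count_cases_old s out) := by unfold Spec_count_cases_old; infer_instance

-- ===== CLAIM (what is proved, stated in full; the proofs are below) =====
def Claim_equal_count_cases_old : Prop := ∀ (s : String), Dom_count_cases_old s → Spec_count_cases_old s (count_cases_old s)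

-- ===== LEMMAS AND PROOFS =====

-- does pattern p occur at position i of cs?
def occB (p cs : List Char) (i : Nat) : Bool := decide (p <+: cs.drop i)

-- the event at position i, as the merged stream of A produces it
def tagCase (cs : List Char) (i : Nat) : Option (Int × String) :=
  if occB ['(','('] cs i then some ((i : Int), "((")
  else if occB [')',')'] cs i then some ((i : Int), "))")
  else none

-- occurrence positions of p in cs that are ≥ k, in increasing order
def occFrom (p cs : List Char) (k : Nat) : List Nat :=
  (List.range cs.length).filter (fun i => decide (k ≤ i) && occB p cs i)

-- B's scan step, re-expressed on Nat positions via occB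
def stepS (cs : List Char) (acc : Int × Int) (i : Nat) : Int × Int :=
  if occB ['(','('] cs i then (acc.1 + 1, acc.2)
  else if occB [')',')'] cs i then (acc.1, acc.2 + acc.1)
  else acc

theorem occFrom_nil (p cs : List Char) (k : Nat)
    (h : ∀ i, k ≤ i → i < cs.length → occB p cs i = false) :
    occFrom p cs k = [] := by
  simp only [occFrom, List.filter_eq_nil_iff]
  intro i hi
  simp only [List.mem_range] at hi
  simp only [Bool.and_eq_true, decide_eq_true_eq, not_and]
  intro hk
  simp [h i hk hi]

theorem occFrom_cons (p cs : List Char) (k m : Nat) (hm : m < cs.length) (hk : k ≤ m)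
    (hocc : occB p cs m = true)
    (hmin : ∀ i, k ≤ i → i < m → occB p cs i = false) :
    occFrom p cs k = m :: occFrom p cs (m + 1) := by
  obtain ⟨d, hd⟩ : ∃ d, cs.length = (m + 1) + d := ⟨cs.length - (m + 1), by omega⟩
  unfold occFrom
  rw [hd, List.range_add, List.filter_append, List.filter_append]
  have h1 : (List.range (m + 1)).filter (fun i => decide (k ≤ i) && occB p cs i) = [m] := by
    rw [List.range_succ, List.filter_append]
    rw [List.filter_eq_nil_iff.mpr ?_, List.nil_append]
    · simp [hk, hocc]
    · intro i hi
      simp only [List.mem_range] at hi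
      by_cases hki : k ≤ i
      · simp [hmin i hki hi]
      · simp [hki]
  have h2 : (List.range (m + 1)).filter (fun i => decide (m + 1 ≤ i) && occB p cs i) = [] := by
    apply List.filter_eq_nil_iff.mpr
    intro i hi
    simp only [List.mem_range] at hi
    simp [Nat.not_le.mpr hi]
  have h3 : ((List.range d).map (m + 1 + ·)).filter (fun i => decide (k ≤ i) && occB p cs i)
      = ((List.range d).map (m + 1 + ·)).filter (fun i => decide (m + 1 ≤ i) && occB p cs i) := by
    apply List.filter_congr
    intro i hi
    simp only [List.mem_map, List.mem_range] at hi
    obtain ⟨j, hj, rfl⟩ := hi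
    have hki : k ≤ m + 1 + j := by omega
    have hmi : m + 1 ≤ m + 1 + j := by omega
    simp [hki, hmi]
  rw [h1, h2, h3]
  simp

theorem goFindall_char (ptn s : String) (hp : ptn.toList ≠ []) :
    ∀ (fuel k : Nat), k ≤ s.toList.length →
      (occFrom ptn.toList s.toList k).length < fuel →
      goFindall ptn s fuel (PySem.Chars.findFrom s.toList ptn.toList (k : Int) none)
        = (occFrom ptn.toList s.toList k).map Int.ofNat := by
  intro fuel
  induction fuel with
  | zero => intro k _ hlen; omega
  | succ fuel ih =>
    intro k hk hlen
    by_cases hr : PySem.Chars.findFrom s.toList ptn.toList (k : Int) none = -1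
    · have hno : ¬ ptn.toList <:+: s.toList.drop k :=
        (PySem.Chars.findFrom_natCast_eq_neg_one_iff s.toList ptn.toList k hk).mp hr
      have hnil : occFrom ptn.toList s.toList k = [] := by
        apply occFrom_nil
        intro i hki hi
        simp only [occB, decide_eq_false_iff_not]
        intro hpre
        apply hno
        have hdd : s.toList.drop i = (s.toList.drop k).drop (i - k) := by
          rw [List.drop_drop]; congr 1; omega
        rw [hdd] at hpre
        exact hpre.isInfix.trans (List.drop_suffix _ _).isInfix
      rw [hnil]
      simp [goFindall, hr]
    · obtain ⟨hkr, hpre, hmin⟩ := PySem.Chars.findFrom_natCast_spec s.toList ptn.toList k hk hr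
      set r := PySem.Chars.findFrom s.toList ptn.toList (k : Int) none with hrdef
      have hr0 : (0 : Int) ≤ r := le_trans (Int.natCast_nonneg k) hkr
      have hrm : r = ((r.toNat : Nat) : Int) := (Int.toNat_of_nonneg hr0).symm
      set m := r.toNat with hmdef
      have hkm : k ≤ m := by omega
      have hml : m < s.toList.length := by
        have h1 := hpre.length_le
        rw [List.length_drop] at h1
        have h2 : 0 < ptn.toList.length := List.length_pos_iff.mpr hp
        omega
      have hoccm : occB ptn.toList s.toList m = true := by
        simp only [occB, decide_eq_true_eq]; exact hpre
      have hminB : ∀ i, k ≤ i → i < m → occB ptn.toList s.toList i = false := by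
        intro i h1 h2
        simp only [occB, decide_eq_false_iff_not]
        exact hmin i h1 h2
      have hcons := occFrom_cons ptn.toList s.toList k m hml hkm hoccm hminB
      rw [hcons]
      rw [show goFindall ptn s (fuel + 1) r
            = r :: goFindall ptn s fuel (PySem.Str.findFrom s ptn (r + 1) none) from by
        simp [goFindall, hr]]
      have hr1 : r + 1 = (((m + 1 : Nat)) : Int) := by omega
      rw [hr1, PySem.Str.findFrom_eq]
      have hlen2 : (occFrom ptn.toList s.toList (m + 1)).length < fuel := by
        rw [hcons] at hlen
        simp only [List.length_cons] at hlen
        omega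
      rw [ih (m + 1) (by omega) hlen2]
      rw [List.map_cons]
      congr 1

theorem strFindall_char (ptn s : String) (hp : ptn.toList ≠ []) :
    strFindall ptn s = (occFrom ptn.toList s.toList 0).map Int.ofNat := by
  unfold strFindall
  rw [PySem.Str.find_eq, ← PySem.Chars.findFrom_zero]
  rw [show (0 : Int) = ((0 : Nat) : Int) from rfl]
  rw [show s.length = s.toList.length from rfl]
  apply goFindall_char ptn s hp (s.toList.length + 1) 0 (Nat.zero_le _)
  have hle : (occFrom ptn.toList s.toList 0).length ≤ (List.range s.toList.length).length :=
    List.length_filter_le _ _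
  simp only [List.length_range] at hle
  omega

theorem occ_disj (cs : List Char) (i : Nat) (h : occB ['(','('] cs i = true) :
    occB [')',')'] cs i = false := by
  simp only [occB, decide_eq_true_eq] at h ⊢
  rw [decide_eq_false_iff_not]
  intro h2
  obtain ⟨t1, ht1⟩ := h
  obtain ⟨t2, ht2⟩ := h2
  rw [← ht1] at ht2
  simp at ht2

theorem mergePairs_nil_right (xs : List (Int × String)) : mergePairs xs [] = xs := by
  cases xs <;> simp [mergePairs]

theorem merge_filters (cs : List Char) :
    ∀ L : List Nat, L.Pairwise (· < ·) →
      mergePairs (List.map (fun i : Nat => ((i : Int), "((")) (L.filter (occB ['(','('] cs)))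
                 (List.map (fun i : Nat => ((i : Int), "))")) (L.filter (occB [')',')'] cs)))
        = L.filterMap (tagCase cs) := by
  intro L
  induction L with
  | nil => intro _; simp [mergePairs]
  | cons i L ih =>
    intro hp
    have hlt : ∀ j ∈ L, i < j := (List.pairwise_cons.mp hp).1
    have ihh := ih (List.pairwise_cons.mp hp).2
    by_cases h1 : occB ['(','('] cs i = true
    · have h2 := occ_disj cs i h1
      rw [List.filter_cons_of_pos h1, List.filter_cons_of_neg (by simp [h2])]
      rw [show (i :: L).filterMap (tagCase cs)
            = ((i : Int), "((") :: L.filterMap (tagCase cs) by simp [tagCase, h1]]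
      rw [List.map_cons]
      cases hF : List.map (fun i : Nat => ((i : Int), "))")) (L.filter (occB [')',')'] cs)) with
      | nil =>
        rw [mergePairs_nil_right]
        rw [hF, mergePairs_nil_right] at ihh
        rw [ihh]
      | cons y ys =>
        have hy : ∃ j ∈ L, y = ((j : Int), "))") := by
          have hm : y ∈ List.map (fun i : Nat => ((i : Int), "))")) (L.filter (occB [')',')'] cs)) := by
            rw [hF]; exact List.mem_cons_self
          simp only [List.mem_map, List.mem_filter] at hm
          obtain ⟨j, ⟨hjL, _⟩, rfl⟩ := hm
          exact ⟨j, hjL, rfl⟩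
        obtain ⟨j, hjL, rfl⟩ := hy
        have hij : i < j := hlt j hjL
        have hpl : pairLt ((j : Int), "))") ((i : Int), "((") = false := by
          simp [pairLt]
          omega
        rw [hF] at ihh
        simp only [mergePairs, hpl, Bool.false_eq_true, if_false]
        rw [ihh]
    · by_cases h2 : occB [')',')'] cs i = true
      · rw [List.filter_cons_of_neg (by simp [h1]), List.filter_cons_of_pos h2]
        rw [show (i :: L).filterMap (tagCase cs)
              = ((i : Int), "))") :: L.filterMap (tagCase cs) by simp [tagCase, h1, h2]]
        rw [List.map_cons]
        cases hF : List.map (fun i : Nat => ((i : Int), "((")) (L.filter (occB ['(','('] cs)) with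
        | nil =>
          rw [hF] at ihh
          simp only [mergePairs] at ihh ⊢
          rw [ihh]
        | cons x xs =>
          have hx : ∃ j ∈ L, x = ((j : Int), "((") := by
            have hm : x ∈ List.map (fun i : Nat => ((i : Int), "((")) (L.filter (occB ['(','('] cs)) := by
              rw [hF]; exact List.mem_cons_self
            simp only [List.mem_map, List.mem_filter] at hm
            obtain ⟨j, ⟨hjL, _⟩, rfl⟩ := hm
            exact ⟨j, hjL, rfl⟩
          obtain ⟨j, hjL, rfl⟩ := hx
          have hij : i < j := hlt j hjL
          have hpl : pairLt ((i : Int), "))") ((j : Int), "((") = true := by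
            simp [pairLt]
            omega
          rw [hF] at ihh
          simp only [mergePairs, hpl, if_true]
          rw [ihh]
      · rw [List.filter_cons_of_neg (by simp [h1]), List.filter_cons_of_neg (by simp [h2])]
        rw [show (i :: L).filterMap (tagCase cs) = L.filterMap (tagCase cs) by
          simp [tagCase, h1, h2]]
        exact ihh

theorem fold_bridge (cs : List Char) :
    ∀ (L : List Nat) (xc yc c : Int),
      (((L.filterMap (tagCase cs)).foldl caseStepA (xc, yc, c)).2.2
        + ((L.filterMap (tagCase cs)).foldl caseStepA (xc, yc, c)).1
          * ((L.filterMap (tagCase cs)).foldl caseStepA (xc, yc, c)).2.1)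
        = (L.foldl (stepS cs) (xc, c + xc * yc)).2 := by
  intro L
  induction L with
  | nil => intro xc yc c; simp
  | cons i L ih =>
    intro xc yc c
    by_cases h1 : occB ['(','('] cs i = true
    · have h2 := occ_disj cs i h1
      rw [show (i :: L).filterMap (tagCase cs)
            = ((i : Int), "((") :: L.filterMap (tagCase cs) by simp [tagCase, h1]]
      rw [List.foldl_cons, List.foldl_cons]
      rw [show caseStepA (xc, yc, c) ((i : Int), "((") = (xc + 1, yc, c - yc) from by
        simp [caseStepA]]
      rw [show stepS cs (xc, c + xc * yc) i = (xc + 1, c + xc * yc) from by simp [stepS, h1]]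
      rw [ih (xc + 1) yc (c - yc)]
      rw [show c - yc + (xc + 1) * yc = c + xc * yc from by ring]
    · by_cases h2 : occB [')',')'] cs i = true
      · rw [show (i :: L).filterMap (tagCase cs)
              = ((i : Int), "))") :: L.filterMap (tagCase cs) by simp [tagCase, h1, h2]]
        rw [List.foldl_cons, List.foldl_cons]
        rw [show caseStepA (xc, yc, c) ((i : Int), "))") = (xc, yc + 1, c) from by
          simp [caseStepA]]
        rw [show stepS cs (xc, c + xc * yc) i = (xc, c + xc * yc + xc) from by
          simp [stepS, h1, h2]]
        rw [ih xc (yc + 1) c]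
        rw [show c + xc * (yc + 1) = c + xc * yc + xc from by ring]
      · rw [show (i :: L).filterMap (tagCase cs) = L.filterMap (tagCase cs) by
          simp [tagCase, h1, h2]]
        rw [List.foldl_cons]
        rw [show stepS cs (xc, c + xc * yc) i = (xc, c + xc * yc) from by simp [stepS, h1, h2]]
        exact ih xc yc c

theorem window_open (s : String) (i : Nat) :
    (PySem.Str.slice s (some (i : Int)) (some ((i : Int) + 2)) == "((")
      = occB ['(','('] s.toList i := by
  have hw : (PySem.Str.slice s (some (i : Int)) (some ((i : Int) + 2))).toList
      = (s.toList.drop i).take 2 := by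
    rw [PySem.Str.toList_slice, PySem.Chars.slice_eq_listSlice]
    rw [show ((i : Int) + 2) = ((i : Int) + ((2 : Nat) : Int)) by norm_num]
    rw [PySem.List.slice_natCast_add]
  rw [Bool.eq_iff_iff]
  simp only [beq_iff_eq, occB, decide_eq_true_eq]
  rw [show (PySem.Str.slice s (some (i : Int)) (some ((i : Int) + 2)) = "((")
        ↔ ((PySem.Str.slice s (some (i : Int)) (some ((i : Int) + 2))).toList = "((".toList)
      from ⟨fun h => by rw [h], fun h => by
        have := congrArg String.ofList h; simpa using this⟩]
  rw [hw, List.prefix_iff_eq_take]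
  constructor
  · intro h; exact h ▸ rfl
  · intro h; exact h.symm

theorem window_close (s : String) (i : Nat) :
    (PySem.Str.slice s (some (i : Int)) (some ((i : Int) + 2)) == "))")
      = occB [')',')'] s.toList i := by
  have hw : (PySem.Str.slice s (some (i : Int)) (some ((i : Int) + 2))).toList
      = (s.toList.drop i).take 2 := by
    rw [PySem.Str.toList_slice, PySem.Chars.slice_eq_listSlice]
    rw [show ((i : Int) + 2) = ((i : Int) + ((2 : Nat) : Int)) by norm_num]
    rw [PySem.List.slice_natCast_add]
  rw [Bool.eq_iff_iff]
  simp only [beq_iff_eq, occB, decide_eq_true_eq]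
  rw [show (PySem.Str.slice s (some (i : Int)) (some ((i : Int) + 2)) = "))")
        ↔ ((PySem.Str.slice s (some (i : Int)) (some ((i : Int) + 2))).toList = "))".toList)
      from ⟨fun h => by rw [h], fun h => by
        have := congrArg String.ofList h; simpa using this⟩]
  rw [hw, List.prefix_iff_eq_take]
  constructor
  · intro h; exact h ▸ rfl
  · intro h; exact h.symm

theorem alt_eq_scan (s : String) :
    count_cases_old_alt s
      = ((List.range (s.toList.length - 1)).foldl (stepS s.toList) (0, 0)).2 := by
  unfold count_cases_old_alt
  rw [show PySem.Str.len s = ((s.toList.length : Nat) : Int) from by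
    simp [PySem.Str.len]]
  rw [PySem.List.pyRange_one]
  rw [show (((s.toList.length : Nat) : Int) - 1 - 0).toNat = s.toList.length - 1 from by omega]
  rw [List.foldl_map]
  rw [show (fun (x : Int × Int) (y : Nat) => scanStepB s x (0 + (y : Int))) = stepS s.toList from by
    funext acc k
    simp only [scanStepB, zero_add, stepS]
    rw [window_open, window_close]]

theorem scan_extend (cs : List Char) (init : Int × Int) :
    (List.range cs.length).foldl (stepS cs) init
      = (List.range (cs.length - 1)).foldl (stepS cs) init := by
  rcases Nat.eq_zero_or_pos cs.length with h0 | hpos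
  · rw [h0]
  · obtain ⟨d, hd⟩ : ∃ d, cs.length = d + 1 := ⟨cs.length - 1, by omega⟩
    rw [hd, Nat.add_sub_cancel, List.range_succ, List.foldl_append]
    have hf : ∀ p : List Char, p.length = 2 → occB p cs d = false := by
      intro p hp
      simp only [occB, decide_eq_false_iff_not]
      intro hpre
      have h1 := hpre.length_le
      rw [List.length_drop] at h1
      omega
    simp [stepS, hf ['(','('] rfl, hf [')',')'] rfl]

theorem a_eq_scan (s : String) :
    count_cases_old s = ((List.range s.toList.length).foldl (stepS s.toList) (0, 0)).2 := by
  unfold count_cases_old strFindall2Str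
  rw [strFindall_char "((" s (by decide), strFindall_char "))" s (by decide)]
  rw [List.map_map, List.map_map]
  rw [show ("((" : String).toList = ['(','('] from rfl,
      show ("))" : String).toList = [')',')'] from rfl]
  have hO : ∀ p : List Char,
      occFrom p s.toList 0 = (List.range s.toList.length).filter (occB p s.toList) := by
    intro p
    unfold occFrom
    apply List.filter_congr
    intro i _
    simp
  rw [hO, hO]
  have hM := merge_filters s.toList (List.range s.toList.length) List.pairwise_lt_range
  rw [show ((fun i => (i, ("((" : String))) ∘ Int.ofNat)
        = (fun i : Nat => ((i : Int), ("((" : String))) from rfl]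
  rw [show ((fun i => (i, ("))" : String))) ∘ Int.ofNat)
        = (fun i : Nat => ((i : Int), ("))" : String))) from rfl]
  rw [hM]
  have hB := fold_bridge s.toList (List.range s.toList.length) 0 0 0
  norm_num at hB
  simpa using hB

-- ===== VERDICT (by name: the statement is the Claim_ definition above) =====
theorem count_cases_old_spec : Claim_equal_count_cases_old := by
  intro s _
  unfold Spec_count_cases_old
  rw [a_eq_scan, alt_eq_scan, scan_extend]
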